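-- pv_equiv track=rewrite | github.com/xiao0o0sheng/funny | python/formatRMB.py | int_read
-- ===== SOURCE A (Python) =====
-- ref = {'1': '壹', '2': '贰', '3': '叁', '4': '肆', '5': '伍', '6': '陆', '7': '柒', '8': '捌', '9': '玖'}
--
-- def int_read(s):
--     ans = ''
--     for i in range(4):
--         if i == 0 and s[i] == '0':
--             continue
--         elif i == 0:
--             ans += ref[s[i]] + '仟'
--         elif i == 1 and s[i] == '0':
--             if s[0] == '0':
--                 continue
--             elif s[2] == s[3] == '0':
--                 break
--             else:
--                 ans += '零'
--         elif i == 1: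
--             ans += ref[s[i]] + '佰'
--         elif i == 2 and s[i] == '0':
--             if s[0] == s[1] == '0':
--                 continue
--             elif s[1] == '0':
--                 continue
--             elif s[3] == '0':
--                 break
--             else:
--                 ans += '零'
--         elif i == 2:
--             if s[i] != '1':
--                 ans += ref[s[i]] + '拾'
--             else:
--                 ans += '拾'
--         elif s[i] == '0':
--             break
--         else:
--             ans += ref[s[i]]
--     return ans
-- ===== SOURCE B (Python) =====
-- ref = {'1': '壹', '2': '贰', '3': '叁', '4': '肆', '5': '伍', '6': '陆', '7': '柒', '8': '捌', '9': '玖'}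
--
-- units = ['仟', '佰', '拾', '']
--
-- def int_read(s):
--     ans = ''
--     started = False
--     pending = False
--     for i, u in enumerate(units):
--         d = s[i]
--         if d == '0':
--             pending = started
--         else:
--             if pending:
--                 ans += '零'
--             ans += ('' if i == 2 and d == '1' else ref[d]) + u
--             started = True
--             pending = False
--     return ans
-- ===== Notes on version B (the rewrite author's own statement) =====
-- stated objective: simpler
-- what changed: Replaces A's per-position branch tree with lookahead at later digits by a single accumulator pass over a units table carrying started/pending-zero flags.
import Mathlib
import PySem

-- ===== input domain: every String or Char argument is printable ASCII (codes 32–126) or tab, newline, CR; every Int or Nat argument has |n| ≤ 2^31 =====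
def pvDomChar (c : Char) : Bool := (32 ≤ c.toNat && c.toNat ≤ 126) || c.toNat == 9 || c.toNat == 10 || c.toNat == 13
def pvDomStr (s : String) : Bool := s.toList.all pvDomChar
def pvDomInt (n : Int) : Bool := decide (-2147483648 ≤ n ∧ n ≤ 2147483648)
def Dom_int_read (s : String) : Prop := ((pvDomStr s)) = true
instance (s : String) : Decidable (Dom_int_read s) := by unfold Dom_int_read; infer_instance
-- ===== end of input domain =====

-- B replaces A's per-position lookahead branch tree with a single units table and a
-- pending-zero accumulator pass (objective: simpler decomposition, same cost).

-- ===== PORT A =====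
-- ref[c] lookup; Python raises KeyError off '1'..'9' — those inputs are outside Pre_
def refGet (c : Char) : String :=
  if c = '1' then "壹" else if c = '2' then "贰" else if c = '3' then "叁"
  else if c = '4' then "肆" else if c = '5' then "伍" else if c = '6' then "陆"
  else if c = '7' then "柒" else if c = '8' then "捌" else if c = '9' then "玖"
  else ""

-- iteration i=3 of A's loop
def stepA3 (c3 : Char) (ans : String) : String :=
  if c3 = '0' then ans else ans ++ refGet c3

-- iteration i=2 of A's loop (with its lookaheads), then i=3
def stepA2 (c0 c1 c2 c3 : Char) (ans : String) : String :=
  if c2 = '0' then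
    if c0 = '0' ∧ c1 = '0' then stepA3 c3 ans
    else if c1 = '0' then stepA3 c3 ans
    else if c3 = '0' then ans
    else stepA3 c3 (ans ++ "零")
  else if c2 ≠ '1' then stepA3 c3 (ans ++ refGet c2 ++ "拾")
  else stepA3 c3 (ans ++ "拾")

-- iteration i=1 of A's loop (with its lookaheads), then i=2..3
def stepA1 (c0 c1 c2 c3 : Char) (ans : String) : String :=
  if c1 = '0' then
    if c0 = '0' then stepA2 c0 c1 c2 c3 ans
    else if c2 = '0' ∧ c3 = '0' then ans
    else stepA2 c0 c1 c2 c3 (ans ++ "零")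
  else stepA2 c0 c1 c2 c3 (ans ++ refGet c1 ++ "佰")

def int_read (s : String) : String :=
  let l := s.toList
  let c0 := (PySem.List.pyGet? l 0).getD '?'
  let c1 := (PySem.List.pyGet? l 1).getD '?'
  let c2 := (PySem.List.pyGet? l 2).getD '?'
  let c3 := (PySem.List.pyGet? l 3).getD '?'
  let ans := if c0 = '0' then "" else refGet c0 ++ "仟"
  stepA1 c0 c1 c2 c3 ans

-- ===== PORT B =====
-- state = (ans, started, pending); one fold over the units table, as in Source B
def stepB (l : List Char) (st : String × Bool × Bool) (p : Int × String) : String × Bool × Bool :=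
  let ans := st.1
  let started := st.2.1
  let pending := st.2.2
  let i := p.1
  let u := p.2
  let d := (PySem.List.pyGet? l i).getD '?'
  if d = '0' then (ans, started, started)
  else
    let ans := if pending then ans ++ "零" else ans
    let ans := ans ++ (if i = 2 ∧ d = '1' then "" else refGet d) ++ u
    (ans, true, false)

def int_read_alt (s : String) : String :=
  let l := s.toList
  (([((0 : Int), "仟"), (1, "佰"), (2, "拾"), (3, "")]).foldl (stepB l) ("", false, false)).1

-- ===== PRECONDITION & SPEC =====
-- Exactly where the Python A returns: fewer than 4 chars → IndexError, a non-digit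
-- among the first 4 chars → KeyError (Python B raises on the same inputs).
def Pre_int_read (s : String) : Prop :=
  4 ≤ s.toList.length ∧ (s.toList.take 4).all Char.isDigit = true
instance (s : String) : Decidable (Pre_int_read s) := by unfold Pre_int_read; infer_instance

def pvWitness_int_read : String := "2045"

def Spec_int_read (s : String) (out : String) : Prop := out = int_read_alt s
instance (s : String) (out : String) : Decidable (Spec_int_read s out) := by unfold Spec_int_read; infer_instance

-- ===== CLAIM (what is proved, stated in full; the proofs are below) =====
def Claim_equal_int_read : Prop := ∀ (s : String), Dom_int_read s → Pre_int_read s → Spec_int_read s (int_read s)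

-- ===== LEMMAS AND PROOFS =====

-- core lemma: the two branch structures agree for arbitrary characters
theorem steps_agree (c0 c1 c2 c3 : Char) (l : List Char)
    (h0 : (PySem.List.pyGet? l 0).getD '?' = c0)
    (h1 : (PySem.List.pyGet? l 1).getD '?' = c1)
    (h2 : (PySem.List.pyGet? l 2).getD '?' = c2)
    (h3 : (PySem.List.pyGet? l 3).getD '?' = c3) :
    stepA1 c0 c1 c2 c3 (if c0 = '0' then "" else refGet c0 ++ "仟")
      = (([((0 : Int), "仟"), (1, "佰"), (2, "拾"), (3, "")]).foldl (stepB l) ("", false, false)).1 := by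
  simp only [List.foldl, stepB, h0, h1, h2, h3]
  unfold stepA1 stepA2 stepA3
  by_cases e0 : c0 = '0' <;> by_cases e1 : c1 = '0' <;> by_cases e2 : c2 = '0' <;>
    by_cases e3 : c3 = '0' <;> by_cases e2' : c2 = '1' <;>
    simp_all

-- ===== VERDICT (by name: the statement is the Claim_ definition above) =====
theorem int_read_spec : Claim_equal_int_read := by
  intro s _ _
  unfold Spec_int_read int_read int_read_alt
  exact (steps_agree _ _ _ _ s.toList rfl rfl rfl rfl)
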